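-- pv_equiv track=rewrite | github.com/AruJoy/algorithm-study | 백준/Gold/5214. 환승/환승.py | bfs
-- ===== SOURCE A (Python) =====
-- from collections import deque
--
-- def bfs(nodes, adj_list, line_list):
--     if nodes == 1:
--         return 1
--     v_list = [False for _ in range(nodes+1)]
--     t_v_list = [False for _ in range(len(line_list))]
--     v_list[1] = True
--     que = deque()
--     que.append((1,1))
--     while que:
--         cur_node, n_visit = que.popleft()
--         for line in adj_list[cur_node]:
--             if t_v_list[line]:
--                 continue
--             t_v_list[line] = True
--             for n in line_list[line]:
--                 if v_list[n]:
--                     continue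
--                 if n == nodes:
--                     return n_visit+1
--                 v_list[n] = True
--                 que.append((n, n_visit+1))
--     return -1
-- ===== SOURCE B (Python) =====
-- def bfs(nodes, adj_list, line_list):
--     if nodes == 1:
--         return 1
--     stations = [1]   # every station discovered so far, in discovery order
--     used = []        # every line already taken, in first-use order
--     d = 1
--     while True:
--         fresh = []                      # lines reachable now but never taken
--         for u in stations:
--             for l in adj_list[u]:
--                 if l not in used and l not in fresh:
--                     fresh.append(l)
--         found = []                      # stations those lines newly reach
--         for l in fresh:
--             for n in line_list[l]:
--                 if n not in stations and n not in found:
--                     found.append(n)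
--         if nodes in found:
--             return d + 1
--         if not found:
--             return -1
--         stations += found
--         used += fresh
--         d += 1
-- ===== Notes on version B (the rewrite author's own statement) =====
-- stated objective: alternative
-- what changed: A runs a node-at-a-time BFS over a dist-tagged FIFO deque with boolean visited arrays; B drops the queue entirely and iterates generation closures: each round it computes the set of newly usable lines from the discovered-station list, then the set of newly reached stations, using ordered membership lists.
-- outside the precondition, e.g. on bfs(3, [[], [0, 1], [], []], [[-1], [3]]): A returns -1, B returns 2; on bfs(2, [[], [-1], []], [[2]]): A returns 2, B returns 2
import Mathlib
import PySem

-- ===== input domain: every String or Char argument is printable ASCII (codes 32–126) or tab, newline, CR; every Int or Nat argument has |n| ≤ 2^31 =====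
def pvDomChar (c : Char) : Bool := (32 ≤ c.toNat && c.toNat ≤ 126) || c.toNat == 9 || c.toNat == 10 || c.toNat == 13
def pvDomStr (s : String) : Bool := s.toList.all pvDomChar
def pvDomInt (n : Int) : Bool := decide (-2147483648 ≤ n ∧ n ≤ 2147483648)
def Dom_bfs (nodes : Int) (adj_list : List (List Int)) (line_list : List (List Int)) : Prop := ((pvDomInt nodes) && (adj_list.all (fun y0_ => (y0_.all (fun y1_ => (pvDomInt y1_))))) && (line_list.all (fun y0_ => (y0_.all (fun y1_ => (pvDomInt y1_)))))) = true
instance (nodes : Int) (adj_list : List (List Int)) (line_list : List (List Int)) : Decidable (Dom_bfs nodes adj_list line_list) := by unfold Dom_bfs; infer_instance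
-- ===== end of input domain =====

-- B replaces A's dist-tagged FIFO deque by per-generation set closure: each round it computes the
-- newly usable lines from the discovered-station list and then the newly reached stations, no queue.
-- Objective: alternative (not claimed faster).

-- ===== PORT A =====
-- xs[i] / v[i] / v[i] = True on a nonnegative in-range index (the only indices reached under Pre_;
-- pyGetD/pySetD are Python-exact on the in-range accesses reached under Pre_)
def rowD (xs : List (List Int)) (i : Int) : List Int := PySem.List.pyGetD xs i []
def getB (v : List Bool) (i : Int) : Bool := PySem.List.pyGetD v i false
def setB (v : List Bool) (i : Int) : List Bool := PySem.List.pySetD v i true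

-- 'for n in line_list[line]: …' body of A (marks v, appends to que, or returns n_visit+1)
def procMembers (nodes : Int) (ms : List Int) (nv : Int) (v : List Bool)
    (que : List (Int × Int)) : Option Int × List Bool × List (Int × Int) :=
  match ms with
  | [] => (none, v, que)
  | n :: rest =>
    if getB v n then procMembers nodes rest nv v que
    else if n = nodes then (some (nv + 1), v, que)
    else procMembers nodes rest nv (setB v n) (que ++ [(n, nv + 1)])

-- 'for line in adj_list[cur_node]: …' body of A
def procLines (nodes : Int) (line_list : List (List Int)) (ls : List Int) (nv : Int)
    (v t : List Bool) (que : List (Int × Int)) :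
    Option Int × List Bool × List Bool × List (Int × Int) :=
  match ls with
  | [] => (none, v, t, que)
  | l :: rest =>
    if getB t l then procLines nodes line_list rest nv v t que
    else
      match procMembers nodes (rowD line_list l) nv v que with
      | (some a, v', que') => (some a, v', setB t l, que')
      | (none, v', que') => procLines nodes line_list rest nv v' (setB t l) que'

-- A's 'while que:' loop; fuel only makes the recursion total (never exhausted under Pre_)
def loopA (nodes : Int) (adj line_list : List (List Int)) :
    Nat → List (Int × Int) → List Bool → List Bool → Int
  | _, [], _, _ => -1
  | 0, _ :: _, _, _ => -1
  | f + 1, (u, nv) :: rest, v, t =>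
    match procLines nodes line_list (rowD adj u) nv v t rest with
    | (some a, _, _, _) => a
    | (none, v', t', que') => loopA nodes adj line_list f que' v' t'

def bfs (nodes : Int) (adj_list : List (List Int)) (line_list : List (List Int)) : Int :=
  if nodes = 1 then 1
  else
    loopA nodes adj_list line_list (nodes.toNat + 2) [(1, 1)]
      (setB (List.replicate (nodes + 1).toNat false) 1)
      (List.replicate line_list.length false)

-- ===== PORT B =====
-- 'for l in adj_list[u]: if l not in used and l not in fresh: fresh.append(l)'
def collectRow (ls used fresh : List Int) : List Int :=
  ls.foldl (fun fr l => if l ∉ used ∧ l ∉ fr then fr ++ [l] else fr) fresh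

-- 'for u in stations: …' outer collection loop
def collectFresh (adj : List (List Int)) (stations used fresh : List Int) : List Int :=
  stations.foldl (fun fr u => collectRow (rowD adj u) used fr) fresh

-- 'for n in line_list[l]: if n not in stations and n not in found: found.append(n)'
def expandLine (ms stations found : List Int) : List Int :=
  ms.foldl (fun fd n => if n ∉ stations ∧ n ∉ fd then fd ++ [n] else fd) found

-- 'for l in fresh: …' outer expansion loop
def expandAll (line_list : List (List Int)) (ls stations found : List Int) : List Int :=
  ls.foldl (fun fd l => expandLine (rowD line_list l) stations fd) found

-- B's 'while True:' loop; fuel only makes the recursion total (never exhausted under Pre_)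
def loopB (nodes : Int) (adj line_list : List (List Int)) :
    Nat → List Int → List Int → Int → Int
  | 0, _, _, _ => -1
  | f + 1, stations, used, d =>
    let fresh := collectFresh adj stations used []
    let found := expandAll line_list fresh stations []
    if nodes ∈ found then d + 1
    else if found = [] then -1
    else loopB nodes adj line_list f (stations ++ found) (used ++ fresh) (d + 1)

def bfs_alt (nodes : Int) (adj_list : List (List Int)) (line_list : List (List Int)) : Int :=
  if nodes = 1 then 1 else loopB nodes adj_list line_list (nodes.toNat + 1) [1] [] 1

-- ===== PRECONDITION & SPEC =====
-- Pre_ admits nodes = 1, the degenerate class where station 1 has no incident line (A stops at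
-- once), and well-formed tube graphs (enough rows, line and station indices in range); outside it
-- A raises IndexError or silently relies on Python's negative-index wraparound (malformed input),
-- which is not behaviour either program should specify.
def Pre_bfs (nodes : Int) (adj_list : List (List Int)) (line_list : List (List Int)) : Prop :=
  nodes = 1 ∨
    (2 ≤ nodes ∧ adj_list[1]? = some []) ∨
    (2 ≤ nodes ∧ nodes + 1 ≤ (adj_list.length : Int) ∧
      (∀ row ∈ adj_list, ∀ l ∈ row, 0 ≤ l ∧ l < (line_list.length : Int)) ∧
      (∀ ms ∈ line_list, ∀ n ∈ ms, 0 ≤ n ∧ n ≤ nodes))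
instance (nodes : Int) (adj_list : List (List Int)) (line_list : List (List Int)) : Decidable (Pre_bfs nodes adj_list line_list) := by unfold Pre_bfs; infer_instance

def pvWitness_bfs : Int × List (List Int) × List (List Int) := (2, [[], [0], []], [[2]])

def Spec_bfs (nodes : Int) (adj_list : List (List Int)) (line_list : List (List Int)) (out : Int) : Prop := out = bfs_alt nodes adj_list line_list
instance (nodes : Int) (adj_list : List (List Int)) (line_list : List (List Int)) (out : Int) : Decidable (Spec_bfs nodes adj_list line_list out) := by unfold Spec_bfs; infer_instance

-- ===== CLAIM (what is proved, stated in full; the proofs are below) =====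
def Claim_equal_bfs : Prop := ∀ (nodes : Int) (adj_list : List (List Int)) (line_list : List (List Int)), Dom_bfs nodes adj_list line_list → Pre_bfs nodes adj_list line_list → Spec_bfs nodes adj_list line_list (bfs nodes adj_list line_list)

-- ===== LEMMAS AND PROOFS =====

-- v ↔ station list S : v[n] holds exactly for the stations collected in S
def VRel (nodes : Int) (v : List Bool) (S : List Int) : Prop :=
  v.length = (nodes + 1).toNat ∧
    ∀ n : Int, 0 ≤ n → n ≤ nodes → getB v n = decide (n ∈ S)

-- t ↔ line list L : t[l] holds exactly for the lines collected in L
def TRel (line_list : List (List Int)) (t : List Bool) (L : List Int) : Prop :=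
  t.length = line_list.length ∧
    ∀ l : Int, 0 ≤ l → l < (line_list.length : Int) → getB t l = decide (l ∈ L)

-- one BFS generation, processed node by node (collect u's fresh lines, expand just those)
def levelFold (adj line_list : List (List Int)) (SAll used : List Int) (F : List Int)
    (p : List Int × List Int) : List Int × List Int :=
  F.foldl
    (fun p u =>
      let fr₁ := collectRow (rowD adj u) used p.1
      (fr₁, expandAll line_list (fr₁.drop p.1.length) SAll p.2))
    p

theorem getB_eq_getElem (v : List Bool) {i : Int} (h0 : 0 ≤ i) (h1 : i < (v.length : Int)) :
    getB v i = v[i.toNat] := PySem.List.pyGetD_eq_getElem v false h0 h1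

theorem setB_eq_set (v : List Bool) {i : Int} (h0 : 0 ≤ i) (h1 : i < (v.length : Int)) :
    setB v i = v.set i.toNat true := by
  simp [setB, PySem.List.pySetD, PySem.List.pySet?, PySem.List.pyIdx?, h0, h1]

theorem length_setB (v : List Bool) (i : Int) : (setB v i).length = v.length :=
  PySem.List.length_pySetD v i true

theorem getB_setB (v : List Bool) {i j : Int} (h0 : 0 ≤ i) (h1 : i < (v.length : Int))
    (h0' : 0 ≤ j) (h1' : j < (v.length : Int)) :
    getB (setB v i) j = if j = i then true else getB v j := by
  rw [setB_eq_set v h0 h1,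
    getB_eq_getElem _ h0' (by simpa using h1'), getB_eq_getElem v h0' h1']
  rw [List.getElem_set]
  by_cases h : j = i
  · simp [h]
  · have : ¬ (i.toNat = j.toNat) := by omega
    simp [this, h]

theorem getB_replicate (m : Nat) {i : Int} (h0 : 0 ≤ i) (h1 : i < (m : Int)) :
    getB (List.replicate m false) i = false := by
  rw [getB_eq_getElem _ h0 (by simpa using h1)]
  simp

theorem rowD_mem (xs : List (List Int)) {i : Int} (h0 : 0 ≤ i) (h1 : i < (xs.length : Int)) :
    rowD xs i ∈ xs := by
  rw [rowD, PySem.List.pyGetD_eq_getElem xs [] h0 h1]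
  exact List.getElem_mem _

theorem collectRow_prefix (ls used fr : List Int) : fr <+: collectRow ls used fr := by
  induction ls generalizing fr with
  | nil => exact List.prefix_refl fr
  | cons l rest ih =>
    simp only [collectRow, List.foldl_cons]
    split
    · exact List.IsPrefix.trans (List.prefix_append fr [l]) (ih (fr ++ [l]))
    · exact ih fr

theorem expandLine_prefix (ms S fd : List Int) : fd <+: expandLine ms S fd := by
  induction ms generalizing fd with
  | nil => exact List.prefix_refl fd
  | cons n rest ih =>
    simp only [expandLine, List.foldl_cons]
    split
    · exact List.IsPrefix.trans (List.prefix_append fd [n]) (ih (fd ++ [n]))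
    · exact ih fd

theorem expandAll_prefix (line_list : List (List Int)) (ls S fd : List Int) :
    fd <+: expandAll line_list ls S fd := by
  induction ls generalizing fd with
  | nil => exact List.prefix_refl fd
  | cons l rest ih =>
    exact List.IsPrefix.trans (expandLine_prefix _ S fd) (ih _)

theorem levelFold_prefix (adj line_list : List (List Int)) (SAll used F : List Int)
    (p : List Int × List Int) :
    p.1 <+: (levelFold adj line_list SAll used F p).1 ∧
      p.2 <+: (levelFold adj line_list SAll used F p).2 := by
  induction F generalizing p with
  | nil => exact ⟨List.prefix_refl _, List.prefix_refl _⟩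
  | cons u rest ih =>
    have h := ih (collectRow (rowD adj u) used p.1,
      expandAll line_list ((collectRow (rowD adj u) used p.1).drop p.1.length) SAll p.2)
    simp only [levelFold, List.foldl_cons] at h ⊢
    exact ⟨(collectRow_prefix _ used p.1).trans h.1,
      (expandAll_prefix line_list _ SAll p.2).trans h.2⟩

theorem collectRow_skip (ls used fr : List Int) (h : ∀ l ∈ ls, l ∈ used) :
    collectRow ls used fr = fr := by
  induction ls generalizing fr with
  | nil => rfl
  | cons l rest ih =>
    simp only [collectRow, List.foldl_cons]
    have : ¬ (l ∉ used ∧ l ∉ fr) := by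
      intro hc; exact hc.1 (h l (by simp))
    rw [if_neg this]
    exact ih fr (fun x hx => h x (by simp [hx]))

theorem length_le_of_nodup_range (nodes : Int) (S : List Int) (hnd : S.Nodup)
    (hwf : ∀ x ∈ S, 0 ≤ x ∧ x ≤ nodes) : S.length ≤ (nodes + 1).toNat := by
  have h1 : S.toFinset.card = S.length := List.toFinset_card_of_nodup hnd
  have h2 : S.toFinset ⊆ Finset.Icc 0 nodes := by
    intro x hx
    rw [List.mem_toFinset] at hx
    have := hwf x hx
    rw [Finset.mem_Icc]
    omega
  have h3 := Finset.card_le_card h2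
  rw [Int.card_Icc] at h3
  omega

theorem nodup_snoc (S : List Int) (n : Int) (h : S.Nodup) (hn : n ∉ S) :
    (S ++ [n]).Nodup := by
  rw [List.nodup_append]
  refine ⟨h, List.nodup_singleton n, ?_⟩
  intro a ha b hb
  rw [List.mem_singleton] at hb
  subst hb
  exact fun he => hn (he ▸ ha)

theorem VRel_setB (nodes : Int) (v : List Bool) (S : List Int) (n : Int)
    (hV : VRel nodes v S) (h0 : 0 ≤ n) (h1 : n ≤ nodes) :
    VRel nodes (setB v n) (S ++ [n]) := by
  have hlen : (v.length : Int) = nodes + 1 := by rw [hV.1]; omega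
  refine ⟨by rw [length_setB, hV.1], ?_⟩
  intro m hm0 hm1
  rw [getB_setB v h0 (by omega) hm0 (by omega)]
  by_cases h : m = n
  · subst h; simp
  · rw [if_neg h, hV.2 m hm0 hm1]
    simp [List.mem_append, h]

theorem mem_step (nodes nv : Int) (SAll : List Int) (hSA : nodes ∉ SAll) :
    ∀ (ms fd : List Int) (v : List Bool) (que : List (Int × Int)),
      (∀ n ∈ ms, 0 ≤ n ∧ n ≤ nodes) → VRel nodes v (SAll ++ fd) → nodes ∉ fd →
      (SAll ++ fd).Nodup →
      (if nodes ∈ expandLine ms SAll fd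
       then (procMembers nodes ms nv v que).1 = some (nv + 1)
       else ∃ v' new, expandLine ms SAll fd = fd ++ new ∧
         procMembers nodes ms nv v que = (none, v', que ++ new.map (fun n => (n, nv + 1))) ∧
         VRel nodes v' (SAll ++ expandLine ms SAll fd) ∧
         (∀ x ∈ new, x ∈ ms) ∧
         (SAll ++ expandLine ms SAll fd).Nodup) := by
  intro ms
  induction ms with
  | nil =>
    intro fd v que _ hV hfd hnd
    simp only [expandLine, List.foldl_nil]
    rw [if_neg hfd]
    exact ⟨v, [], by simp, by simp [procMembers], hV, by simp, hnd⟩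
  | cons n rest ih =>
    intro fd v que hwf hV hfd hnd
    obtain ⟨hn0, hn1⟩ := hwf n (by simp)
    have hrest : ∀ x ∈ rest, 0 ≤ x ∧ x ≤ nodes := fun x hx => hwf x (by simp [hx])
    have hgv : getB v n = decide (n ∈ SAll ++ fd) := hV.2 n hn0 hn1
    have hex : expandLine (n :: rest) SAll fd =
        expandLine rest SAll (if n ∉ SAll ∧ n ∉ fd then fd ++ [n] else fd) := rfl
    by_cases hmem : n ∈ SAll ++ fd
    · have hc : ¬ (n ∉ SAll ∧ n ∉ fd) := by
        rw [List.mem_append] at hmem; tauto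
      have hA : procMembers nodes (n :: rest) nv v que = procMembers nodes rest nv v que := by
        simp [procMembers, hgv, hmem]
      rw [hex, if_neg hc, hA]
      have key := ih fd v que hrest hV hfd hnd
      by_cases hfin : nodes ∈ expandLine rest SAll fd
      · rw [if_pos hfin] at key ⊢
        exact key
      · rw [if_neg hfin] at key ⊢
        obtain ⟨v', new, he, hp, hV', hsub, hnd''⟩ := key
        exact ⟨v', new, he, hp, hV', fun x hx => List.mem_cons_of_mem _ (hsub x hx), hnd''⟩
    · have hc : n ∉ SAll ∧ n ∉ fd := by
        rw [List.mem_append] at hmem; tauto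
      have hgv' : getB v n = false := by rw [hgv]; simp [hmem]
      by_cases hn : n = nodes
      · subst hn
        have hmem' : n ∈ expandLine rest SAll (fd ++ [n]) :=
          (expandLine_prefix rest SAll (fd ++ [n])).subset (by simp)
        rw [hex, if_pos hc, if_pos hmem']
        simp [procMembers, hgv']
      · have hVnew : VRel nodes (setB v n) (SAll ++ (fd ++ [n])) := by
          have := VRel_setB nodes v (SAll ++ fd) n hV hn0 hn1
          rwa [List.append_assoc] at this
        have hfd' : nodes ∉ fd ++ [n] := by
          simp [hfd]
          exact fun h => hn h.symm
        have hnd' : (SAll ++ (fd ++ [n])).Nodup := by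
          have := nodup_snoc (SAll ++ fd) n hnd hmem
          rwa [List.append_assoc] at this
        have key := ih (fd ++ [n]) (setB v n) (que ++ [(n, nv + 1)]) hrest hVnew hfd' hnd'
        have hA : procMembers nodes (n :: rest) nv v que =
            procMembers nodes rest nv (setB v n) (que ++ [(n, nv + 1)]) := by
          simp [procMembers, hgv', hn]
        rw [hex, if_pos hc, hA]
        by_cases hfin : nodes ∈ expandLine rest SAll (fd ++ [n])
        · rw [if_pos hfin] at key ⊢
          exact key
        · rw [if_neg hfin] at key ⊢
          obtain ⟨v', new, he, hp, hV', hsub, hnd''⟩ := key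
          refine ⟨v', n :: new, ?_, ?_, hV', ?_, hnd''⟩
          · rw [he]; simp
          · rw [hp]; simp
          · intro x hx
            rcases List.mem_cons.mp hx with rfl | hx
            · simp
            · exact List.mem_cons_of_mem _ (hsub x hx)

theorem TRel_setB (line_list : List (List Int)) (t : List Bool) (L : List Int) (l : Int)
    (hT : TRel line_list t L) (h0 : 0 ≤ l) (h1 : l < (line_list.length : Int)) :
    TRel line_list (setB t l) (L ++ [l]) := by
  have hlen : (t.length : Int) = line_list.length := by rw [hT.1]
  refine ⟨by rw [length_setB, hT.1], ?_⟩
  intro m hm0 hm1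
  rw [getB_setB t h0 (by omega) hm0 (by omega)]
  by_cases h : m = l
  · subst h; simp
  · rw [if_neg h, hT.2 m hm0 hm1]
    simp [List.mem_append, h]

theorem node_step (nodes nv : Int) (line_list : List (List Int)) (SAll used : List Int)
    (hSA : nodes ∉ SAll)
    (hline : ∀ ms ∈ line_list, ∀ n ∈ ms, 0 ≤ n ∧ n ≤ nodes) :
    ∀ (ls fr fd : List Int) (v t : List Bool) (que : List (Int × Int)),
      (∀ l ∈ ls, 0 ≤ l ∧ l < (line_list.length : Int)) →
      TRel line_list t (used ++ fr) → VRel nodes v (SAll ++ fd) → nodes ∉ fd →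
      (SAll ++ fd).Nodup →
      (if nodes ∈ expandAll line_list ((collectRow ls used fr).drop fr.length) SAll fd
       then (procLines nodes line_list ls nv v t que).1 = some (nv + 1)
       else ∃ v' t' newS,
         expandAll line_list ((collectRow ls used fr).drop fr.length) SAll fd = fd ++ newS ∧
         procLines nodes line_list ls nv v t que =
           (none, v', t', que ++ newS.map (fun n => (n, nv + 1))) ∧
         VRel nodes v' (SAll ++ (fd ++ newS)) ∧
         TRel line_list t' (used ++ collectRow ls used fr) ∧
         (∀ x ∈ newS, 0 ≤ x ∧ x ≤ nodes) ∧
         (SAll ++ (fd ++ newS)).Nodup ∧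
         (∀ l ∈ ls, l ∈ used ++ collectRow ls used fr)) := by
  intro ls
  induction ls with
  | nil =>
    intro fr fd v t que _ hT hV hfd hnd
    simp only [collectRow, List.foldl_nil, List.drop_length]
    have hE : expandAll line_list [] SAll fd = fd := rfl
    rw [hE, if_neg hfd]
    exact ⟨v, t, [], by simp, by simp [procLines], by simpa using hV, hT, by simp,
      by simpa using hnd, by simp⟩
  | cons l rest ih =>
    intro fr fd v t que hwf hT hV hfd hnd
    obtain ⟨hl0, hl1⟩ := hwf l (by simp)
    have hrest : ∀ x ∈ rest, 0 ≤ x ∧ x < (line_list.length : Int) :=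
      fun x hx => hwf x (List.mem_cons_of_mem _ hx)
    have hgt : getB t l = decide (l ∈ used ++ fr) := hT.2 l hl0 hl1
    have hcr : collectRow (l :: rest) used fr =
        collectRow rest used (if l ∉ used ∧ l ∉ fr then fr ++ [l] else fr) := rfl
    by_cases hmem : l ∈ used ++ fr
    · have hc : ¬ (l ∉ used ∧ l ∉ fr) := by rw [List.mem_append] at hmem; tauto
      have hA : procLines nodes line_list (l :: rest) nv v t que =
          procLines nodes line_list rest nv v t que := by
        simp [procLines, hgt, hmem]
      rw [hcr, if_neg hc, hA]
      have key := ih fr fd v t que hrest hT hV hfd hnd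
      by_cases hfin : nodes ∈ expandAll line_list ((collectRow rest used fr).drop fr.length) SAll fd
      · rw [if_pos hfin] at key ⊢
        exact key
      · rw [if_neg hfin] at key ⊢
        obtain ⟨v', t', newS, he, hp, hV', hT', hwfS, hnd', hcov⟩ := key
        refine ⟨v', t', newS, he, hp, hV', hT', hwfS, hnd', ?_⟩
        intro x hx
        rcases List.mem_cons.mp hx with rfl | hx
        · rw [List.mem_append] at hmem ⊢
          rcases hmem with h | h
          · exact Or.inl h
          · exact Or.inr ((collectRow_prefix rest used fr).subset h)
        · exact hcov x hx
    · have hc : l ∉ used ∧ l ∉ fr := by rw [List.mem_append] at hmem; tauto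
      have hgt' : getB t l = false := by rw [hgt]; simp [hmem]
      have hms : rowD line_list l ∈ line_list := rowD_mem line_list hl0 hl1
      have hmswf := hline _ hms
      obtain ⟨a, ha⟩ := collectRow_prefix rest used (fr ++ [l])
      have hdropA : (collectRow rest used (fr ++ [l])).drop fr.length =
          l :: (collectRow rest used (fr ++ [l])).drop (fr ++ [l]).length := by
        rw [← ha, List.drop_left, List.append_assoc, List.drop_left]
        rfl
      rw [hcr, if_pos hc, hdropA]
      have hexp : expandAll line_list
            (l :: (collectRow rest used (fr ++ [l])).drop (fr ++ [l]).length) SAll fd =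
          expandAll line_list ((collectRow rest used (fr ++ [l])).drop (fr ++ [l]).length)
            SAll (expandLine (rowD line_list l) SAll fd) := rfl
      rw [hexp]
      have kmem := mem_step nodes nv SAll hSA (rowD line_list l) fd v que hmswf hV hfd hnd
      by_cases h1 : nodes ∈ expandLine (rowD line_list l) SAll fd
      · rw [if_pos h1] at kmem
        have houter : nodes ∈ expandAll line_list
            ((collectRow rest used (fr ++ [l])).drop (fr ++ [l]).length) SAll
            (expandLine (rowD line_list l) SAll fd) :=
          (expandAll_prefix line_list _ SAll _).subset h1
        rw [if_pos houter]
        rcases hpm : procMembers nodes (rowD line_list l) nv v que with ⟨o, v2, que2⟩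
        rw [hpm] at kmem
        simp only at kmem
        subst kmem
        simp [procLines, hgt', hpm]
      · rw [if_neg h1] at kmem
        obtain ⟨v2, new2, he2, hp2, hV2, hsub2, hnd2⟩ := kmem
        have hA : procLines nodes line_list (l :: rest) nv v t que =
            procLines nodes line_list rest nv v2 (setB t l)
              (que ++ new2.map (fun n => (n, nv + 1))) := by
          simp [procLines, hgt', hp2]
        rw [hA, he2]
        rw [he2] at hV2 hnd2 h1
        have hT2 : TRel line_list (setB t l) (used ++ (fr ++ [l])) := by
          have := TRel_setB line_list t (used ++ fr) l hT hl0 hl1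
          rwa [List.append_assoc] at this
        have key := ih (fr ++ [l]) (fd ++ new2) v2 (setB t l)
          (que ++ new2.map (fun n => (n, nv + 1))) hrest hT2 hV2 h1 hnd2
        by_cases hfin : nodes ∈ expandAll line_list
            ((collectRow rest used (fr ++ [l])).drop (fr ++ [l]).length) SAll (fd ++ new2)
        · rw [if_pos hfin] at key ⊢
          exact key
        · rw [if_neg hfin] at key ⊢
          obtain ⟨v', t', newS, heq, hp, hV', hT', hwfS, hnd', hcov⟩ := key
          refine ⟨v', t', new2 ++ newS, ?_, ?_, ?_, hT', ?_, ?_, ?_⟩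
          · rw [heq, List.append_assoc]
          · rw [hp]
            simp [List.append_assoc]
          · rwa [List.append_assoc] at hV'
          · intro x hx
            rw [List.mem_append] at hx
            rcases hx with hx | hx
            · exact hmswf x (hsub2 x hx)
            · exact hwfS x hx
          · rwa [List.append_assoc] at hnd'
          · intro x hx
            rcases List.mem_cons.mp hx with rfl | hx
            · rw [List.mem_append]
              exact Or.inr ((collectRow_prefix rest used (fr ++ [x])).subset (by simp))
            · exact hcov x hx

theorem level_step (nodes : Int) (adj line_list : List (List Int)) (SAll used : List Int)
    (hSA : nodes ∉ SAll)
    (hadj : nodes + 1 ≤ (adj.length : Int))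
    (hrow : ∀ row ∈ adj, ∀ l ∈ row, 0 ≤ l ∧ l < (line_list.length : Int))
    (hline : ∀ ms ∈ line_list, ∀ n ∈ ms, 0 ≤ n ∧ n ≤ nodes) :
    ∀ (F : List Int) (fA' : Nat) (d : Int) (fr fd : List Int) (v t : List Bool),
      (∀ u ∈ F, 0 ≤ u ∧ u ≤ nodes) →
      TRel line_list t (used ++ fr) → VRel nodes v (SAll ++ fd) → nodes ∉ fd →
      (SAll ++ fd).Nodup →
      (let st := levelFold adj line_list SAll used F (fr, fd)
       if nodes ∈ st.2
       then loopA nodes adj line_list (F.length + fA')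
              (F.map (fun u => (u, d)) ++ fd.map (fun n => (n, d + 1))) v t = d + 1
       else ∃ v' t' newS,
         st.2 = fd ++ newS ∧
         loopA nodes adj line_list (F.length + fA')
             (F.map (fun u => (u, d)) ++ fd.map (fun n => (n, d + 1))) v t =
           loopA nodes adj line_list fA' (st.2.map (fun n => (n, d + 1))) v' t' ∧
         VRel nodes v' (SAll ++ st.2) ∧
         TRel line_list t' (used ++ st.1) ∧
         (∀ x ∈ newS, 0 ≤ x ∧ x ≤ nodes) ∧
         (SAll ++ st.2).Nodup ∧
         (∀ u ∈ F, ∀ l ∈ rowD adj u, l ∈ used ++ st.1)) := by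
  intro F
  induction F with
  | nil =>
    intro fA' d fr fd v t _ hT hV hfd hnd
    simp only [levelFold, List.foldl_nil]
    rw [if_neg hfd]
    exact ⟨v, t, [], by simp, by simp, hV, hT, by simp, hnd, by simp⟩
  | cons u rest ih =>
    intro fA' d fr fd v t hwf hT hV hfd hnd
    obtain ⟨hu0, hu1⟩ := hwf u (by simp)
    have hwfrest : ∀ x ∈ rest, 0 ≤ x ∧ x ≤ nodes :=
      fun x hx => hwf x (List.mem_cons_of_mem _ hx)
    have hurow : ∀ l ∈ rowD adj u, 0 ≤ l ∧ l < (line_list.length : Int) :=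
      hrow _ (rowD_mem adj hu0 (by omega))
    have hnode := node_step nodes d line_list SAll used hSA hline (rowD adj u) fr fd v t
      (rest.map (fun u => (u, d)) ++ fd.map (fun n => (n, d + 1))) hurow hT hV hfd hnd
    have hLF : levelFold adj line_list SAll used (u :: rest) (fr, fd) =
        levelFold adj line_list SAll used rest
          (collectRow (rowD adj u) used fr,
            expandAll line_list ((collectRow (rowD adj u) used fr).drop fr.length) SAll fd) := rfl
    rw [hLF]
    by_cases h1 : nodes ∈ expandAll line_list
        ((collectRow (rowD adj u) used fr).drop fr.length) SAll fd
    · rw [if_pos h1] at hnode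
      have houter : nodes ∈ (levelFold adj line_list SAll used rest
          (collectRow (rowD adj u) used fr,
            expandAll line_list ((collectRow (rowD adj u) used fr).drop fr.length) SAll fd)).2 :=
        (levelFold_prefix adj line_list SAll used rest _).2.subset h1
      rw [if_pos houter]
      rcases hpl : procLines nodes line_list (rowD adj u) d v t
          (rest.map (fun u => (u, d)) ++ fd.map (fun n => (n, d + 1))) with ⟨o, v2, t2, que2⟩
      rw [hpl] at hnode
      simp only at hnode
      subst hnode
      have hfuel : (u :: rest).length + fA' = (rest.length + fA') + 1 := by
        simp only [List.length_cons]; omega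
      rw [hfuel]
      simp only [List.map_cons, List.cons_append]
      simp [loopA, hpl]
    · rw [if_neg h1] at hnode
      obtain ⟨v2, t2, newS, he, hpl, hV2, hT2, hwfS, hnd2, hcov⟩ := hnode
      rw [he] at h1 ⊢
      have key := ih fA' d (collectRow (rowD adj u) used fr) (fd ++ newS) v2 t2
        hwfrest hT2 hV2 h1 hnd2
      have hstep : loopA nodes adj line_list ((u :: rest).length + fA')
          ((u :: rest).map (fun u => (u, d)) ++ fd.map (fun n => (n, d + 1))) v t =
          loopA nodes adj line_list (rest.length + fA')
            (rest.map (fun u => (u, d)) ++ (fd ++ newS).map (fun n => (n, d + 1))) v2 t2 := by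
        have hfuel : (u :: rest).length + fA' = (rest.length + fA') + 1 := by
          simp only [List.length_cons]; omega
        rw [hfuel]
        simp only [List.map_cons, List.cons_append]
        simp [loopA, hpl, List.map_append, List.append_assoc]
      by_cases hfin : nodes ∈ (levelFold adj line_list SAll used rest
          (collectRow (rowD adj u) used fr, fd ++ newS)).2
      · rw [if_pos hfin] at key ⊢
        rw [hstep]
        exact key
      · rw [if_neg hfin] at key ⊢
        obtain ⟨v', t', newS', heq, hloop, hV', hT', hwfS', hnd', hcov'⟩ := key
        refine ⟨v', t', newS ++ newS', ?_, ?_, hV', hT', ?_, hnd', ?_⟩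
        · rw [heq, List.append_assoc]
        · rw [hstep, hloop]
        · intro x hx
          rw [List.mem_append] at hx
          rcases hx with hx | hx
          · exact hwfS x hx
          · exact hwfS' x hx
        · intro x hx
          rcases List.mem_cons.mp hx with rfl | hx
          · intro ll hll
            have := hcov ll hll
            rw [List.mem_append] at this ⊢
            rcases this with h | h
            · exact Or.inl h
            · exact Or.inr ((levelFold_prefix adj line_list SAll used rest
                (collectRow (rowD adj x) used fr, fd ++ newS)).1.subset h)
          · exact hcov' x hx

theorem collectFresh_prefix (adj : List (List Int)) (S used fr : List Int) :
    fr <+: collectFresh adj S used fr := by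
  induction S generalizing fr with
  | nil => exact List.prefix_refl fr
  | cons u rest ih =>
    exact (collectRow_prefix (rowD adj u) used fr).trans (ih _)

theorem levelFold_split (adj line_list : List (List Int)) (SAll used : List Int) :
    ∀ (F : List Int) (fr fd : List Int),
      levelFold adj line_list SAll used F (fr, fd) =
        (collectFresh adj F used fr,
          expandAll line_list ((collectFresh adj F used fr).drop fr.length) SAll fd) := by
  intro F
  induction F with
  | nil =>
    intro fr fd
    simp [levelFold, collectFresh, expandAll, List.drop_length]
  | cons u rest ih =>
    intro fr fd
    have hL : levelFold adj line_list SAll used (u :: rest) (fr, fd) =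
        levelFold adj line_list SAll used rest
          (collectRow (rowD adj u) used fr,
            expandAll line_list ((collectRow (rowD adj u) used fr).drop fr.length) SAll fd) := rfl
    have hcf : collectFresh adj (u :: rest) used fr =
        collectFresh adj rest used (collectRow (rowD adj u) used fr) := rfl
    rw [hL, ih, hcf]
    obtain ⟨a, ha⟩ := collectRow_prefix (rowD adj u) used fr
    obtain ⟨b, hb⟩ := collectFresh_prefix adj rest used (collectRow (rowD adj u) used fr)
    rw [← hb, ← ha, List.append_assoc, List.drop_left, ← List.append_assoc fr a b,
      List.drop_left]
    simp [expandAll, List.foldl_append]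

theorem collectFresh_skip (adj : List (List Int)) (used : List Int) :
    ∀ (S fr : List Int), (∀ u ∈ S, ∀ l ∈ rowD adj u, l ∈ used) →
      collectFresh adj S used fr = fr := by
  intro S
  induction S with
  | nil => intro fr _; rfl
  | cons u rest ih =>
    intro fr h
    simp only [collectFresh, List.foldl_cons]
    rw [collectRow_skip _ _ _ (h u (by simp))]
    exact ih fr (fun x hx => h x (by simp [hx]))

theorem main_loop (nodes : Int) (adj line_list : List (List Int))
    (hn : 2 ≤ nodes)
    (hadj : nodes + 1 ≤ (adj.length : Int))
    (hrow : ∀ row ∈ adj, ∀ l ∈ row, 0 ≤ l ∧ l < (line_list.length : Int))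
    (hline : ∀ ms ∈ line_list, ∀ n ∈ ms, 0 ≤ n ∧ n ≤ nodes) :
    ∀ (fB : Nat) (Sold F used : List Int) (d : Int) (v t : List Bool) (fA : Nat),
      VRel nodes v (Sold ++ F) → TRel line_list t used →
      (∀ u ∈ Sold ++ F, 0 ≤ u ∧ u ≤ nodes) → nodes ∉ Sold ++ F → (Sold ++ F).Nodup →
      (∀ u ∈ Sold, ∀ l ∈ rowD adj u, l ∈ used) →
      F.length + ((nodes + 1).toNat - (Sold ++ F).length) ≤ fA →
      1 + ((nodes + 1).toNat - (Sold ++ F).length) ≤ fB →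
      loopA nodes adj line_list fA (F.map (fun u => (u, d))) v t =
        loopB nodes adj line_list fB (Sold ++ F) used d := by
  intro fB
  induction fB with
  | zero =>
    intro Sold F used d v t fA hV hT hwf hni hnd hcov hfA hfB
    exact absurd hfB (by omega)
  | succ fB' ih =>
    intro Sold F used d v t fA hV hT hwf hni hnd hcov hfA hfB
    have hbound := length_le_of_nodup_range nodes (Sold ++ F) hnd hwf
    have hfr : collectFresh adj (Sold ++ F) used [] = collectFresh adj F used [] := by
      have h1 : collectFresh adj (Sold ++ F) used [] =
          collectFresh adj F used (collectFresh adj Sold used []) := by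
        simp [collectFresh, List.foldl_append]
      rw [h1, collectFresh_skip adj used Sold [] hcov]
    have hsplit := levelFold_split adj line_list (Sold ++ F) used F [] []
    simp only [List.length_nil, List.drop_zero] at hsplit
    have hlev := level_step nodes adj line_list (Sold ++ F) used hni hadj hrow hline F
      (fA - F.length) d [] [] v t (fun u hu => hwf u (List.mem_append_right Sold hu))
      (by simpa using hT) (by simpa using hV) (by simp) (by simpa using hnd)
    rw [hsplit] at hlev
    simp only [List.map_nil, List.append_nil] at hlev
    have hflen : F.length ≤ fA := by omega
    have hfa : F.length + (fA - F.length) = fA := by omega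
    rw [hfa] at hlev
    have hB : loopB nodes adj line_list (fB' + 1) (Sold ++ F) used d =
        (if nodes ∈ expandAll line_list (collectFresh adj F used []) (Sold ++ F) []
         then d + 1
         else if expandAll line_list (collectFresh adj F used []) (Sold ++ F) [] = []
         then -1
         else loopB nodes adj line_list fB'
            ((Sold ++ F) ++ expandAll line_list (collectFresh adj F used []) (Sold ++ F) [])
            (used ++ collectFresh adj F used []) (d + 1)) := by
      simp only [loopB]
      rw [hfr]
    by_cases hfound : nodes ∈ expandAll line_list (collectFresh adj F used []) (Sold ++ F) []
    · rw [if_pos hfound] at hlev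
      rw [hB, if_pos hfound]
      exact hlev
    · rw [if_neg hfound] at hlev
      obtain ⟨v', t', newS, he, hloop, hV', hT', hwfS', hnd', hcov'⟩ := hlev
      simp only [List.nil_append] at he
      by_cases hempty : expandAll line_list (collectFresh adj F used []) (Sold ++ F) [] = []
      · rw [hB, if_neg hfound, if_pos hempty]
        rw [hloop, hempty]
        simp only [List.map_nil]
        cases fA - F.length <;> rfl
      · rw [hB, if_neg hfound, if_neg hempty]
        have hwfall : ∀ u ∈ (Sold ++ F) ++ expandAll line_list (collectFresh adj F used [])
            (Sold ++ F) [], 0 ≤ u ∧ u ≤ nodes := by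
          intro x hx
          rw [List.mem_append] at hx
          rcases hx with hx | hx
          · exact hwf x hx
          · exact hwfS' x (he ▸ hx)
        have hbound2 := length_le_of_nodup_range nodes _ hnd' hwfall
        have hlenpos : 0 < (expandAll line_list (collectFresh adj F used [])
            (Sold ++ F) []).length := List.length_pos_iff.mpr hempty
        have hni2 : nodes ∉ (Sold ++ F) ++ expandAll line_list (collectFresh adj F used [])
            (Sold ++ F) [] := by
          rw [List.mem_append]
          rintro (h | h)
          · exact hni h
          · exact hfound h
        have hcov2 : ∀ u ∈ Sold ++ F, ∀ l ∈ rowD adj u,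
            l ∈ used ++ collectFresh adj F used [] := by
          intro x hx l hl
          rw [List.mem_append] at hx
          rcases hx with hx | hx
          · exact List.mem_append_left _ (hcov x hx l hl)
          · exact hcov' x hx l hl
        have key := ih (Sold ++ F)
          (expandAll line_list (collectFresh adj F used []) (Sold ++ F) [])
          (used ++ collectFresh adj F used []) (d + 1) v' t' (fA - F.length)
          hV' hT' hwfall hni2 hnd' hcov2
          (by
            have hl2 : ((Sold ++ F) ++ expandAll line_list (collectFresh adj F used [])
                (Sold ++ F) []).length = (Sold ++ F).length +
                (expandAll line_list (collectFresh adj F used []) (Sold ++ F) []).length :=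
              List.length_append
            omega)
          (by
            have hl2 : ((Sold ++ F) ++ expandAll line_list (collectFresh adj F used [])
                (Sold ++ F) []).length = (Sold ++ F).length +
                (expandAll line_list (collectFresh adj F used []) (Sold ++ F) []).length :=
              List.length_append
            omega)
        rw [hloop, key]

-- ===== VERDICT (by name: the statement is the Claim_ definition above) =====
theorem bfs_spec : Claim_equal_bfs := by
  intro nodes adj line_list _ hpre
  unfold Spec_bfs
  rcases hpre with h1 | ⟨hn, hrow1⟩ | ⟨hn, hadj, hrow, hline⟩
  · simp [bfs, bfs_alt, h1]
  · have hne : nodes ≠ 1 := by omega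
    obtain ⟨hlt, heq⟩ := List.getElem?_eq_some_iff.mp hrow1
    have hrow : rowD adj 1 = [] := by
      rw [rowD, PySem.List.pyGetD_eq_getElem adj [] (by omega) (by exact_mod_cast hlt)]
      simpa using heq
    rw [bfs, bfs_alt, if_neg hne, if_neg hne,
      show nodes.toNat + 2 = (nodes.toNat + 1) + 1 from rfl]
    simp [loopA, hrow, procLines, loopB, collectFresh, collectRow, expandAll]
  · have hne : nodes ≠ 1 := by omega
    rw [bfs, bfs_alt, if_neg hne, if_neg hne]
    have hlenrep : ((List.replicate (nodes + 1).toNat (false : Bool)).length : Int) =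
        nodes + 1 := by
      rw [List.length_replicate]
      omega
    have hv : VRel nodes (setB (List.replicate (nodes + 1).toNat false) 1) ([] ++ [1]) := by
      refine ⟨by rw [length_setB, List.length_replicate], ?_⟩
      intro n hn0 hn1
      rw [getB_setB _ (by omega) (by omega) hn0 (by omega)]
      by_cases h : n = 1
      · simp [h]
      · rw [if_neg h, getB_replicate _ hn0 (by omega)]
        simp [h]
    have ht : TRel line_list (List.replicate line_list.length false) [] := by
      refine ⟨List.length_replicate, ?_⟩
      intro l hl0 hl1
      rw [getB_replicate _ hl0 (by simpa using hl1)]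
      simp
    have key := main_loop nodes adj line_list hn hadj hrow hline (nodes.toNat + 1)
      [] [1] [] 1 (setB (List.replicate (nodes + 1).toNat false) 1)
      (List.replicate line_list.length false) (nodes.toNat + 2)
      hv ht (by intro u hu; simp at hu; omega) (by simp; omega) (by simp)
      (by intro u hu; simp at hu) (by simp; omega) (by simp; omega)
    simpa using key
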